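-- pv_equiv track=rewrite | github.com/CRMP-25/rag-backend | rag_engine.py | handle_person_specific_messages
-- ===== SOURCE A (Python) =====
-- from typing import Dict, Any, List
--
-- def handle_person_specific_messages(messages: Dict, person: str, query: str) -> str:
--     """Handle messages from specific person"""
--
--     person_messages = []
--     for sender, msg_list in messages["by_sender"].items():
--         if person.lower() in sender.lower():
--             person_messages.extend(msg_list)
--
--     if person_messages:
--         response_parts = [f"✅ **Yes, you received messages from {person}:**", ""]
--
--         today_msgs = [m for m in person_messages if m["recency"] == "today"]
--         if today_msgs:
--             response_parts.append("**Today:**")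
--             for msg in today_msgs[:3]:
--                 response_parts.append(f"• {msg['timestamp_str']}: {msg['message_content']}")
--
--         yesterday_msgs = [m for m in person_messages if m["recency"] == "yesterday"]
--         if yesterday_msgs:
--             response_parts.append("**Yesterday:**")
--             for msg in yesterday_msgs[:2]:
--                 response_parts.append(f"• {msg['timestamp_str']}: {msg['message_content']}")
--
--         return "\n".join(response_parts)
--     else:
--         return f"❌ **No recent messages from {person}.**\n\nTry checking the spelling or look at your full message history."
-- ===== SOURCE B (Python) =====
-- def handle_person_specific_messages(messages, person, query):
--     """Handle messages from specific person (single-pass bucket version)"""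
--     needle = person.lower()
--     buckets = {}
--     found = False
--     for sender, msg_list in messages["by_sender"].items():
--         if needle in sender.lower():
--             for m in msg_list:
--                 found = True
--                 buckets.setdefault(m["recency"], []).append(m)
--     if not found:
--         return f"❌ **No recent messages from {person}.**\n\nTry checking the spelling or look at your full message history."
--     lines = [f"✅ **Yes, you received messages from {person}:**", ""]
--     for label, recency, limit in (("**Today:**", "today", 3), ("**Yesterday:**", "yesterday", 2)):
--         bucket = buckets.get(recency, [])
--         if bucket:
--             lines.append(label)
--             lines.extend(f"• {m['timestamp_str']}: {m['message_content']}" for m in bucket[:limit])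
--     return "\n".join(lines)
-- ===== Notes on version B (the rewrite author's own statement) =====
-- stated objective: alternative
-- what changed: B replaces A's three scans (collect person_messages across matching senders, then filter it once per recency) with a single pass that buckets every matching message into a dict keyed by recency while tracking a found flag, plus one emit loop over the (label, recency, limit) table.
import Mathlib
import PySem

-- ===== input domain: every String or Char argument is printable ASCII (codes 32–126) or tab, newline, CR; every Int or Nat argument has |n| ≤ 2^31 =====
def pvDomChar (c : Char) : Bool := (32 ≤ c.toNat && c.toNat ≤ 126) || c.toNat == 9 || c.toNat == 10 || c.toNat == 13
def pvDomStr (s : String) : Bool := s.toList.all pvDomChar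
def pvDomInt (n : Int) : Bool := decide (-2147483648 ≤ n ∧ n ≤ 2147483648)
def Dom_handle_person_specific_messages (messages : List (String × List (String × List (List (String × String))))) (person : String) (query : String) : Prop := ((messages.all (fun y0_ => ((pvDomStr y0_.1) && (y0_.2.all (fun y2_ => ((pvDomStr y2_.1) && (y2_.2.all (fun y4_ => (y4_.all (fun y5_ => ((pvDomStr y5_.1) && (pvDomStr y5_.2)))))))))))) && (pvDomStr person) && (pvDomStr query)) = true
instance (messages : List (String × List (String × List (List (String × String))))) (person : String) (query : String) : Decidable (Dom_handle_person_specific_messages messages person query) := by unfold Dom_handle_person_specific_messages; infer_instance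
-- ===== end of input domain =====

-- B fuses A's three scans (collect matching senders' messages + a filter per recency) into one
-- pass that buckets each message by its recency while scanning the senders (objective: alternative).

-- ===== PORT A =====
-- literal transliteration of A: collect person_messages across matching senders, then
-- filter twice by recency and append the formatted lines.
def handle_person_specific_messages (messages : List (String × List (String × List (List (String × String))))) (person : String) (query : String) : String :=
  let person_messages :=
    ((PySem.Dict.ofList ((PySem.Dict.ofList messages).getD "by_sender" [])).items).foldl
      (fun acc p =>
        if PySem.Str.isIn (PySem.Str.lower person) (PySem.Str.lower p.1) then acc ++ p.2 else acc) []
  if person_messages.isEmpty = false then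
    let response_parts := ["✅ **Yes, you received messages from " ++ person ++ ":**", ""]
    let today_msgs := person_messages.filter
      (fun m => (PySem.Dict.ofList m).getD "recency" "" == "today")
    let response_parts :=
      if today_msgs.isEmpty = false then
        (today_msgs.take 3).foldl
          (fun ps m => ps ++ ["• " ++ (PySem.Dict.ofList m).getD "timestamp_str" "" ++ ": " ++ (PySem.Dict.ofList m).getD "message_content" ""])
          (response_parts ++ ["**Today:**"])
      else response_parts
    let yesterday_msgs := person_messages.filter
      (fun m => (PySem.Dict.ofList m).getD "recency" "" == "yesterday")
    let response_parts :=
      if yesterday_msgs.isEmpty = false then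
        (yesterday_msgs.take 2).foldl
          (fun ps m => ps ++ ["• " ++ (PySem.Dict.ofList m).getD "timestamp_str" "" ++ ": " ++ (PySem.Dict.ofList m).getD "message_content" ""])
          (response_parts ++ ["**Yesterday:**"])
      else response_parts
    PySem.Str.join "\n" response_parts
  else
    "❌ **No recent messages from " ++ person ++ ".**\n\nTry checking the spelling or look at your full message history."

-- ===== PORT B =====
-- literal transliteration of B: one pass building (buckets, found), then an emit loop over
-- the two (label, recency, limit) tuples.
def handle_person_specific_messages_alt (messages : List (String × List (String × List (List (String × String))))) (person : String) (query : String) : String :=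
  let needle := PySem.Str.lower person
  let st :=
    ((PySem.Dict.ofList ((PySem.Dict.ofList messages).getD "by_sender" [])).items).foldl
      (fun (st : PySem.Dict String (List (List (String × String))) × Bool) p =>
        if PySem.Str.isIn needle (PySem.Str.lower p.1) then
          p.2.foldl
            (fun st2 m =>
              (st2.1.modify ((PySem.Dict.ofList m).getD "recency" "") [] (· ++ [m]), true))
            st
        else st)
      (PySem.Dict.mk [], false)
  if st.2 = false then
    "❌ **No recent messages from " ++ person ++ ".**\n\nTry checking the spelling or look at your full message history."
  else
    let lines := ["✅ **Yes, you received messages from " ++ person ++ ":**", ""]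
    let lines :=
      [("**Today:**", "today", (3 : Nat)), ("**Yesterday:**", "yesterday", (2 : Nat))].foldl
        (fun lines t =>
          let bucket := st.1.getD t.2.1 []
          if bucket.isEmpty = false then
            (lines ++ [t.1]) ++ (bucket.take t.2.2).map
              (fun m => "• " ++ (PySem.Dict.ofList m).getD "timestamp_str" "" ++ ": " ++ (PySem.Dict.ofList m).getD "message_content" "")
          else lines)
        lines
    PySem.Str.join "\n" lines

-- ===== PRECONDITION & SPEC =====
-- the messages of matching senders, in iteration order (used only to state Pre_)
def pvMatchMsgs (messages : List (String × List (String × List (List (String × String))))) (person : String) : List (List (String × String)) :=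
  (((PySem.Dict.ofList ((PySem.Dict.ofList messages).getD "by_sender" [])).items).filter
    (fun p => PySem.Str.isIn (PySem.Str.lower person) (PySem.Str.lower p.1))).flatMap (·.2)

-- Pre_ excludes exactly the inputs where the Python raises KeyError: a missing "by_sender" key,
-- a matching message without "recency", or a printed message (first 3 of today / first 2 of
-- yesterday) without "timestamp_str" or "message_content".
def Pre_handle_person_specific_messages (messages : List (String × List (String × List (List (String × String))))) (person : String) (query : String) : Prop :=
  (PySem.Dict.ofList messages).contains "by_sender" = true ∧
  (∀ m ∈ pvMatchMsgs messages person, (PySem.Dict.ofList m).contains "recency" = true) ∧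
  (∀ m ∈ ((pvMatchMsgs messages person).filter (fun m => (PySem.Dict.ofList m).getD "recency" "" == "today")).take 3,
    (PySem.Dict.ofList m).contains "timestamp_str" = true ∧ (PySem.Dict.ofList m).contains "message_content" = true) ∧
  (∀ m ∈ ((pvMatchMsgs messages person).filter (fun m => (PySem.Dict.ofList m).getD "recency" "" == "yesterday")).take 2,
    (PySem.Dict.ofList m).contains "timestamp_str" = true ∧ (PySem.Dict.ofList m).contains "message_content" = true)
instance (messages : List (String × List (String × List (List (String × String))))) (person : String) (query : String) : Decidable (Pre_handle_person_specific_messages messages person query) := by unfold Pre_handle_person_specific_messages; infer_instance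

def pvWitness_handle_person_specific_messages : (List (String × List (String × List (List (String × String))))) × String × String :=
  ([("by_sender", [("Alice", [[("recency", "today"), ("timestamp_str", "9:00"), ("message_content", "hi")]]), ("Bob", [])])], "ali", "any messages from alice?")

def Spec_handle_person_specific_messages (messages : List (String × List (String × List (List (String × String))))) (person : String) (query : String) (out : String) : Prop := out = handle_person_specific_messages_alt messages person query
instance (messages : List (String × List (String × List (List (String × String))))) (person : String) (query : String) (out : String) : Decidable (Spec_handle_person_specific_messages messages person query out) := by unfold Spec_handle_person_specific_messages; infer_instance

-- ===== CLAIM (what is proved, stated in full; the proofs are below) =====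
def Claim_equal_handle_person_specific_messages : Prop := ∀ (messages : List (String × List (String × List (List (String × String))))) (person : String) (query : String), Dom_handle_person_specific_messages messages person query → Pre_handle_person_specific_messages messages person query → Spec_handle_person_specific_messages messages person query (handle_person_specific_messages messages person query)

-- ===== LEMMAS AND PROOFS =====

-- A's collecting loop is a flatMap over the matching senders
theorem pv_afold_eq {α β : Type} (c : β → Bool) (g : β → List α) (l : List β) (acc : List α) :
    l.foldl (fun acc p => if c p then acc ++ g p else acc) acc
      = acc ++ ((l.filter c).flatMap g) := by
  induction l generalizing acc with
  | nil => simp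
  | cons p tl ih =>
    simp only [List.foldl_cons, List.filter_cons]
    by_cases h : c p = true
    · simp [h, ih]
    · simp [h, ih]

-- B's inner bucket loop: the found flag
theorem pv_inner_snd {α : Type} (k : α → String) (ml : List α)
    (d : PySem.Dict String (List α)) (fd : Bool) :
    (ml.foldl (fun st2 m => (st2.1.modify (k m) [] (· ++ [m]), true)) (d, fd)).2
      = (fd || !ml.isEmpty) := by
  induction ml generalizing d fd with
  | nil => simp
  | cons m tl ih => simp [List.foldl_cons, ih]

-- B's inner bucket loop: each bucket collects the messages with that recency, in order
theorem pv_inner_getD {α : Type} (k : α → String) (ml : List α)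
    (d : PySem.Dict String (List α)) (fd : Bool) (r : String) :
    ((ml.foldl (fun st2 m => (st2.1.modify (k m) [] (· ++ [m]), true)) (d, fd)).1).getD r []
      = d.getD r [] ++ ml.filter (fun m => k m == r) := by
  induction ml generalizing d fd with
  | nil => simp
  | cons m tl ih =>
    rw [List.foldl_cons, ih, List.filter_cons]
    simp only [PySem.Dict.modify, PySem.Dict.getD_insert]
    by_cases h : r = k m
    · simp [h]
    · simp [h, Ne.symm h]

-- B's outer loop: the found flag is "some matching message exists"
theorem pv_outer_snd {α β : Type} (c : β → Bool) (k : α → String) (g : β → List α)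
    (l : List β) (d : PySem.Dict String (List α)) (fd : Bool) :
    (l.foldl (fun st p => if c p then
        (g p).foldl (fun st2 m => (st2.1.modify (k m) [] (· ++ [m]), true)) st else st) (d, fd)).2
      = (fd || !((l.filter c).flatMap g).isEmpty) := by
  induction l generalizing d fd with
  | nil => simp
  | cons p tl ih =>
    simp only [List.foldl_cons, List.filter_cons]
    by_cases h : c p = true
    · rw [if_pos h]
      have := ih (((g p).foldl (fun st2 m => (st2.1.modify (k m) [] (· ++ [m]), true)) (d, fd)).1)
        (((g p).foldl (fun st2 m => (st2.1.modify (k m) [] (· ++ [m]), true)) (d, fd)).2)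
      rw [Prod.mk.eta] at this
      rw [this, pv_inner_snd, h]
      cases hgp : g p <;> simp [hgp]
    · rw [if_neg h, ih]
      simp [h]

-- B's outer loop: each bucket equals the recency-filter of A's person_messages
theorem pv_outer_getD {α β : Type} (c : β → Bool) (k : α → String) (g : β → List α)
    (l : List β) (d : PySem.Dict String (List α)) (fd : Bool) (r : String) :
    ((l.foldl (fun st p => if c p then
        (g p).foldl (fun st2 m => (st2.1.modify (k m) [] (· ++ [m]), true)) st else st) (d, fd)).1).getD r []
      = d.getD r [] ++ ((l.filter c).flatMap g).filter (fun m => k m == r) := by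
  induction l generalizing d fd with
  | nil => simp
  | cons p tl ih =>
    simp only [List.foldl_cons, List.filter_cons]
    by_cases h : c p = true
    · rw [if_pos h]
      have := ih (((g p).foldl (fun st2 m => (st2.1.modify (k m) [] (· ++ [m]), true)) (d, fd)).1)
        (((g p).foldl (fun st2 m => (st2.1.modify (k m) [] (· ++ [m]), true)) (d, fd)).2)
      rw [Prod.mk.eta] at this
      rw [this, pv_inner_getD, h]
      simp [List.filter_append, List.append_assoc]
    · rw [if_neg h, ih]
      simp [h]

-- ===== VERDICT (by name: the statement is the Claim_ definition above) =====
theorem handle_person_specific_messages_spec : Claim_equal_handle_person_specific_messages := by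
  intro messages person query _ _
  unfold Spec_handle_person_specific_messages
  unfold handle_person_specific_messages handle_person_specific_messages_alt
  simp only [pv_afold_eq, pv_outer_snd, pv_outer_getD, List.nil_append, Bool.false_or]
  have hempty : ∀ (k : String) (d0 : List (List (String × String))),
      (PySem.Dict.mk ([] : List (String × List (List (String × String))))).getD k d0 = d0 :=
    fun _ _ => rfl
  simp only [hempty, List.foldl_cons, List.foldl_nil, PySem.List.foldl_append_singleton_eq_map]
  set pm := List.flatMap Prod.snd
      (List.filter (fun p => PySem.Str.isIn (PySem.Str.lower person) (PySem.Str.lower p.1))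
        (PySem.Dict.ofList ((PySem.Dict.ofList messages).getD "by_sender" [])).items)
  cases hpm : pm.isEmpty with
  | true => simp
  | false =>
    simp only [Bool.not_false, reduceIte]
    cases hT : (List.filter (fun m => (PySem.Dict.ofList m).getD "recency" "" == "today") pm).isEmpty <;>
    cases hY : (List.filter (fun m => (PySem.Dict.ofList m).getD "recency" "" == "yesterday") pm).isEmpty <;>
      simp [hT, hY, List.append_assoc]
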